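-- pv_equiv track=rewrite | github.com/nielpal99/finance-rag | ingestion/transcript_scraper.py | last_n_calendar_quarters
-- ===== SOURCE A (Python) =====
-- def last_n_calendar_quarters(n: int) -> list[tuple[int, int]]:
--     """Return the last *n* completed calendar quarters as (year, quarter) tuples,
--     newest first.  Today is 2026-03-24 → most recent complete quarter = Q4 2025."""
--     # Q4 2025 is complete; Q1 2026 is in progress → start from (2025, 4)
--     year, q = 2025, 4
--     quarters = []
--     for _ in range(n):
--         quarters.append((year, q))
--         q -= 1
--         if q == 0:
--             q = 4
--             year -= 1
--     return quarters
-- ===== SOURCE B (Python) =====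
-- def last_n_calendar_quarters(n: int) -> list[tuple[int, int]]:
--     """Return the last *n* completed calendar quarters as (year, quarter) tuples,
--     newest first.  Today is 2026-03-24 -> most recent complete quarter = Q4 2025."""
--     base = 2025 * 4 + 3  # quarter index of Q4 2025 (index = year*4 + quarter-1)
--     return [(idx // 4, idx % 4 + 1) for idx in range(base, base - n, -1)]
-- ===== Notes on version B (the rewrite author's own statement) =====
-- stated objective: idiomatic
-- what changed: Replaces the stateful decrement-with-carry loop over (year, q) by a stateless comprehension over a descending integer quarter index, recovering (year, quarter) per element with divmod arithmetic.
import Mathlib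
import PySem

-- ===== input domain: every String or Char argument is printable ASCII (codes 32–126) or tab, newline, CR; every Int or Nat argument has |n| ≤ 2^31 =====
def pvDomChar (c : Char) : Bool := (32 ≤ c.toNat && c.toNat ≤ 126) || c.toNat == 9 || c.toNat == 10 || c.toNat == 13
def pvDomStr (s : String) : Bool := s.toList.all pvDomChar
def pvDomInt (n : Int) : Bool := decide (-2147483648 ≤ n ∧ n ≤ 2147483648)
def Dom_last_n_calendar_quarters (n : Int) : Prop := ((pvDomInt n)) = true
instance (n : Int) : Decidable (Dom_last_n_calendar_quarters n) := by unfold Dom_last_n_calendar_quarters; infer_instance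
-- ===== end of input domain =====

-- B replaces A's stateful decrement-with-carry loop by a stateless map over a
-- descending quarter index, decoding (year, quarter) per element with floordiv/mod.
-- ===== PORT A =====
-- loop body of A's 'for _ in range(n)': state = (year, q, quarters)
def aStep (s : Int × Int × List (Int × Int)) (_i : Int) : Int × Int × List (Int × Int) :=
  let year := s.1
  let q := s.2.1
  let quarters := s.2.2 ++ [(year, q)]
  let q' := q - 1
  if q' = 0 then (year - 1, 4, quarters) else (year, q', quarters)

def last_n_calendar_quarters (n : Int) : List (Int × Int) :=
  ((PySem.List.pyRange 0 n 1).foldl aStep (2025, 4, [])).2.2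

-- ===== PORT B =====
def last_n_calendar_quarters_alt (n : Int) : List (Int × Int) :=
  let base : Int := 2025 * 4 + 3
  (PySem.List.pyRange base (base - n) (-1)).map
    (fun idx => (PySem.Int.floordiv idx 4, PySem.Int.mod idx 4 + 1))

-- ===== PRECONDITION & SPEC =====
def Spec_last_n_calendar_quarters (n : Int) (out : List (Int × Int)) : Prop := out = last_n_calendar_quarters_alt n
instance (n : Int) (out : List (Int × Int)) : Decidable (Spec_last_n_calendar_quarters n out) := by unfold Spec_last_n_calendar_quarters; infer_instance

-- ===== CLAIM (what is proved, stated in full; the proofs are below) =====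
def Claim_equal_last_n_calendar_quarters : Prop := ∀ (n : Int), Dom_last_n_calendar_quarters n → Spec_last_n_calendar_quarters n (last_n_calendar_quarters n)

-- ===== LEMMAS AND PROOFS =====

-- decoding the quarter index: for 1 ≤ q ≤ 4, idx = 4*year + q - 1 decodes back to (year, q)
theorem decode_idx (year q : Int) (h1 : 1 ≤ q) (h4 : q ≤ 4) :
    (PySem.Int.floordiv (4 * year + q - 1) 4, PySem.Int.mod (4 * year + q - 1) 4 + 1)
      = (year, q) := by
  have hd : Int.fdiv (4 * year + q - 1) 4 = (4 * year + q - 1) / 4 :=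
    Int.fdiv_eq_ediv_of_nonneg _ (by norm_num)
  have hm : Int.fmod (4 * year + q - 1) 4 = (4 * year + q - 1) % 4 := by
    rw [Int.fmod_eq_emod]; simp
  simp only [PySem.Int.floordiv, PySem.Int.mod, hd, hm, Prod.mk.injEq]
  omega

-- A's loop, run once for each element of any list l from a legal state (year, q, acc),
-- appends exactly the decoded descending index range of length l.length.
theorem aLoop_eq (l : List Int) : ∀ (year q : Int) (acc : List (Int × Int)),
    1 ≤ q → q ≤ 4 →
    (l.foldl aStep (year, q, acc)).2.2 =
      acc ++ (PySem.List.pyRange (4 * year + q - 1) (4 * year + q - 1 - l.length) (-1)).map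
        (fun idx => (PySem.Int.floordiv idx 4, PySem.Int.mod idx 4 + 1)) := by
  induction l with
  | nil =>
      intro year q acc h1 h4
      simp only [List.foldl_nil, List.length_nil, Nat.cast_zero, sub_zero]
      rw [PySem.List.pyRange_neg_one_eq_nil le_rfl]
      simp
  | cons x l ih =>
      intro year q acc h1 h4
      have hcons : PySem.List.pyRange (4 * year + q - 1)
          (4 * year + q - 1 - ((x :: l).length : Int)) (-1)
          = (4 * year + q - 1) :: PySem.List.pyRange (4 * year + q - 1 - 1)
              (4 * year + q - 1 - ((x :: l).length : Int)) (-1) := by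
        apply PySem.List.pyRange_neg_one_cons
        have : ((x :: l).length : Int) = l.length + 1 := by simp
        omega
      rw [hcons]
      simp only [List.foldl_cons, List.map_cons, decode_idx year q h1 h4]
      by_cases hq : q - 1 = 0
      · have hs : aStep (year, q, acc) x = (year - 1, 4, acc ++ [(year, q)]) := by
          simp [aStep, hq]
        rw [hs, ih (year - 1) 4 _ (by omega) (by omega)]
        have h2 : 4 * (year - 1) + 4 - 1 = 4 * year + q - 1 - 1 := by omega
        rw [h2]
        have h3 : 4 * year + q - 1 - 1 - (l.length : Int)
            = 4 * year + q - 1 - ((x :: l).length : Int) := by simp; omega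
        rw [h3]
        simp
      · have hs : aStep (year, q, acc) x = (year, q - 1, acc ++ [(year, q)]) := by
          simp [aStep, hq]
        rw [hs, ih year (q - 1) _ (by omega) (by omega)]
        have h2 : 4 * year + (q - 1) - 1 = 4 * year + q - 1 - 1 := by omega
        rw [h2]
        have h3 : 4 * year + q - 1 - 1 - (l.length : Int)
            = 4 * year + q - 1 - ((x :: l).length : Int) := by simp; omega
        rw [h3]
        simp

-- ===== VERDICT (by name: the statement is the Claim_ definition above) =====
theorem last_n_calendar_quarters_spec : Claim_equal_last_n_calendar_quarters := by
  intro n _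
  unfold Spec_last_n_calendar_quarters last_n_calendar_quarters last_n_calendar_quarters_alt
  rw [aLoop_eq _ 2025 4 [] (by omega) (by omega)]
  by_cases hn : n ≤ 0
  · have h1 : PySem.List.pyRange 0 n 1 = [] := PySem.List.pyRange_one_eq_nil (by omega)
    have h2 : PySem.List.pyRange 8103 (8103 - n) (-1) = [] :=
      PySem.List.pyRange_neg_one_eq_nil (by omega)
    simp [h1, h2]
  · have hlen : ((PySem.List.pyRange 0 n 1).length : Int) = n := by
      rw [PySem.List.length_pyRange_one]; omega
    rw [hlen]
    norm_num
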